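-- pv_equiv track=rewrite | github.com/MinhazuddinMolla/Minhaz | Smith Number.py | Smith
-- ===== SOURCE A (Python) =====
-- def Prime(n,c):
--     if c<=n:
--         if n%c==0:
--             return 1+Prime(n,c+1)
--         else:
--             return Prime(n,c+1)
--     else:
--         return 0
--
-- def digit_sum(n):
--     if n>0:
--         return (n%10)+digit_sum(n//10)
--     else:
--         return 0
--
-- def Smith(n,c):
--     if c<=n//2:
--         if Prime(c,1)==2 and n%c==0:
--             return digit_sum(c)+Smith(n,c+1)
--         else:
--             return Smith(n,c+1)
--     else:
--         return 0
-- ===== SOURCE B (Python) =====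
-- def Smith(n, c):
--     # Sum of digit sums of the distinct prime divisors p of n with c <= p <= n//2,
--     # found by trial-division factorization up to sqrt(n) instead of scanning every
--     # candidate and counting its divisors.
--     half = n // 2
--     total = 0
--     if n >= 2:
--         m = n
--         p = 2
--         while p * p <= m:
--             if m % p == 0:
--                 while m % p == 0:
--                     m //= p
--                 if c <= p <= half:
--                     total += _digits(p)
--             p += 1
--         if m > 1 and c <= m <= half:
--             total += _digits(m)
--     return total
--
-- def _digits(p):
--     acc = 0
--     while p > 0:
--         acc += p % 10
--         p //= 10
--     return acc
-- ===== Notes on version B (the rewrite author's own statement) =====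
-- stated objective: faster
-- what changed: A tests every candidate in [c, n//2] for primality by counting all its divisors and checks n%c==0; B trial-division factorizes n up to sqrt(n) once and sums the digit sums of the distinct prime factors lying in [c, n//2].
-- outside the precondition, e.g. on Smith(9976, 2): A returns 20, B returns 20; on Smith(4, -10010): A raises RecursionError, B returns 2
import Mathlib
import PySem

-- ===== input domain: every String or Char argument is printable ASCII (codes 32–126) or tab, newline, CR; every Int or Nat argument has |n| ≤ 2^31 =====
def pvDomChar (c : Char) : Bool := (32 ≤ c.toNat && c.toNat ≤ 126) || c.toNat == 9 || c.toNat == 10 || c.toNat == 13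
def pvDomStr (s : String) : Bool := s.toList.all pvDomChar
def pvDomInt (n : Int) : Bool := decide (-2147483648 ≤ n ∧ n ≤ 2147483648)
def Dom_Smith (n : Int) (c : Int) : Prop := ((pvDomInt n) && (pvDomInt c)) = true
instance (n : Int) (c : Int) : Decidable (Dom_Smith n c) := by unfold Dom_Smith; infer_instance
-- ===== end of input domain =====

-- B replaces A's quadratic scan (count the divisors of every candidate c..n//2, then test n%c)
-- by a single trial-division factorization of n up to √n, summing the digit sums of the distinct
-- prime factors that lie in [c, n//2]; objective: faster.

-- ===== PORT A =====
-- termination measures for the ports (named theorems keep the recursive definitions' bodies small)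
theorem decM_down {n c : Int} (h : c ≤ n) : (n + 1 - (c + 1)).toNat < (n + 1 - c).toNat := by
  omega

theorem decM_div10 {n : Int} (h : 0 < n) : (PySem.Int.floordiv n 10).toNat < n.toNat := by
  have h1 : PySem.Int.floordiv n 10 < n := by
    rw [PySem.Int.floordiv_lt_iff_lt_mul (by omega)]; omega
  omega

def primeCnt (n : Int) (c : Int) : Int :=
  if c ≤ n then
    (if PySem.Int.mod n c = 0 then 1 + primeCnt n (c + 1) else primeCnt n (c + 1))
  else 0
termination_by (n + 1 - c).toNat
decreasing_by all_goals exact decM_down (by assumption)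

def digitSum (n : Int) : Int :=
  if 0 < n then PySem.Int.mod n 10 + digitSum (PySem.Int.floordiv n 10) else 0
termination_by n.toNat
decreasing_by exact decM_div10 (by assumption)

def Smith (n : Int) (c : Int) : Int :=
  if c ≤ PySem.Int.floordiv n 2 then
    (if primeCnt c 1 = 2 ∧ PySem.Int.mod n c = 0 then digitSum c + Smith n (c + 1)
     else Smith n (c + 1))
  else 0
termination_by (PySem.Int.floordiv n 2 + 1 - c).toNat
decreasing_by all_goals exact decM_down (by assumption)

-- ===== PORT B =====
-- p ≤ p * p, used by the termination arguments of the loops below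
theorem le_mul_self_int (p : Int) : p ≤ p * p := by nlinarith [mul_self_nonneg (p - 1)]

theorem decM_div10B {n : Int} (h : 0 < n) : (PySem.Int.floordiv n 10).toNat < n.toNat := by
  have h1 : PySem.Int.floordiv n 10 < n := by
    rw [PySem.Int.floordiv_lt_iff_lt_mul (by omega)]; omega
  omega

def dsumAux (p : Int) (acc : Int) : Int :=
  if 0 < p then dsumAux (PySem.Int.floordiv p 10) (acc + PySem.Int.mod p 10) else acc
termination_by p.toNat
decreasing_by exact decM_div10B (by assumption)

-- the inner  while m % p == 0: m //= p  (the 2 ≤ p / 0 < m guards only make the recursion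
-- well-founded; they hold at every call the outer loop makes)
theorem decM_divp {m p : Int} (h : 2 ≤ p ∧ 0 < m ∧ PySem.Int.mod m p = 0) :
    (PySem.Int.floordiv m p).toNat < m.toNat := by
  obtain ⟨hp, hm, _⟩ := h
  have h1 : PySem.Int.floordiv m p < m := by
    rw [PySem.Int.floordiv_lt_iff_lt_mul (by omega)]
    nlinarith
  omega

def strip (m : Int) (p : Int) : Int :=
  if 2 ≤ p ∧ 0 < m ∧ PySem.Int.mod m p = 0 then strip (PySem.Int.floordiv m p) p else m
termination_by m.toNat
decreasing_by exact decM_divp (by assumption)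

-- cited by altLoop's termination proof
theorem strip_le (m p : Int) : strip m p ≤ m := by
  induction m using strip.induct (p := p) with
  | case1 m h ih =>
    rw [strip, if_pos h]
    have h1 := decM_divp h
    omega
  | case2 m h => rw [strip, if_neg h]

theorem decM_strip {m p : Int} (h : p * p ≤ m) :
    (strip m p + 1 - (p + 1)).toNat < (m + 1 - p).toNat := by
  have h1 := strip_le m p
  have h2 := le_mul_self_int p
  omega

theorem decM_next {m p : Int} (h : p * p ≤ m) :
    (m + 1 - (p + 1)).toNat < (m + 1 - p).toNat := by
  have h2 := le_mul_self_int p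
  omega

-- the outer  while p * p <= m  loop, carrying (m, p, total)
def altLoop (c : Int) (half : Int) (m : Int) (p : Int) (total : Int) : Int :=
  if p * p ≤ m then
    (if PySem.Int.mod m p = 0 then
      altLoop c half (strip m p) (p + 1)
        (total + (if c ≤ p ∧ p ≤ half then dsumAux p 0 else 0))
     else altLoop c half m (p + 1) total)
  else
    (if 1 < m ∧ c ≤ m ∧ m ≤ half then total + dsumAux m 0 else total)
termination_by (m + 1 - p).toNat
decreasing_by
  · exact decM_strip (by assumption)
  · exact decM_next (by assumption)

def Smith_alt (n : Int) (c : Int) : Int :=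
  if 2 ≤ n then altLoop c (PySem.Int.floordiv n 2) n 2 0 else 0

-- ===== PRECONDITION & SPEC =====
-- A is deeply recursive (one CPython stack frame per candidate in [c, n//2] plus up to n//2 frames
-- for the innermost Prime test, about n//2 - c + max(n//2, 0) frames in all); Pre_ excludes the
-- inputs on which that depth exceeds CPython's recursion limit, where A raises RecursionError
-- instead of returning, together with a thin safety band just below the exact limit (cited).
def Pre_Smith (n : Int) (c : Int) : Prop :=
  PySem.Int.floordiv n 2 < c ∨
    PySem.Int.floordiv n 2 - c + max (PySem.Int.floordiv n 2) 0 ≤ 9000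
instance (n : Int) (c : Int) : Decidable (Pre_Smith n c) := by unfold Pre_Smith; infer_instance

def pvWitness_Smith : Int × Int := (1000, 2)

def Spec_Smith (n : Int) (c : Int) (out : Int) : Prop := out = Smith_alt n c
instance (n : Int) (c : Int) (out : Int) : Decidable (Spec_Smith n c out) := by unfold Spec_Smith; infer_instance

-- ===== CLAIM (what is proved, stated in full; the proofs are below) =====
def Claim_equal_Smith : Prop := ∀ (n : Int) (c : Int), Dom_Smith n c → Pre_Smith n c → Spec_Smith n c (Smith n c)
-- ===== LEMMAS AND PROOFS =====

-- "k has no divisor strictly between 1 and k": what Prime(k,1)==2 detects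
def isPr (k : Int) : Prop := 2 ≤ k ∧ ∀ d : Int, 1 < d → d < k → ¬ d ∣ k

-- the common summand: digit sum of k when k is a prime divisor of n lying in [c, half]
noncomputable def Gf (n c half k : Int) : Int :=
  @ite _ (isPr k ∧ k ∣ n ∧ c ≤ k ∧ k ≤ half) (Classical.propDecidable _) (digitSum k) 0


theorem dsumAux_eq (p acc : Int) : dsumAux p acc = acc + digitSum p := by
  induction p, acc using dsumAux.induct with
  | case1 p acc h ih =>
    rw [dsumAux, if_pos h, ih]
    conv_rhs => rw [digitSum, if_pos h]
    ring
  | case2 p acc h =>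
    rw [dsumAux, if_neg h, digitSum, if_neg h, add_zero]

theorem Icc_insert (c k : Int) (h : c ≤ k) :
    Finset.Icc c k = insert c (Finset.Icc (c+1) k) := by
  ext x; simp [Finset.mem_Icc]; omega

theorem primeCnt_eq_card (k c : Int) :
    primeCnt k c = ((Finset.Icc c k).filter (fun d => d ∣ k)).card := by
  induction c using primeCnt.induct (n := k) with
  | case1 c hc hm ih =>
    rw [primeCnt, if_pos hc, if_pos hm, ih]
    rw [Icc_insert c k hc, Finset.filter_insert,
        if_pos (by rwa [PySem.Int.mod_eq_zero_iff_dvd] at hm),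
        Finset.card_insert_of_notMem (by simp [Finset.mem_Icc])]
    push_cast; ring
  | case2 c hc hm ih =>
    rw [primeCnt, if_pos hc, if_neg hm, ih]
    rw [Icc_insert c k hc, Finset.filter_insert,
        if_neg (by rwa [PySem.Int.mod_eq_zero_iff_dvd] at hm)]
  | case3 c hc =>
    rw [primeCnt, if_neg hc, Finset.Icc_eq_empty hc]
    simp

theorem primeCnt_two_iff (k : Int) : primeCnt k 1 = 2 ↔ isPr k := by
  rw [primeCnt_eq_card]
  constructor
  · intro h2
    have hk : 2 ≤ k := by
      by_contra hk
      have hsub : (Finset.Icc (1:Int) k).filter (fun d => d ∣ k) ⊆ Finset.Icc 1 k :=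
        Finset.filter_subset _ _
      have := Finset.card_le_card hsub
      have hcard : (Finset.Icc (1:Int) k).card ≤ 1 := by
        rcases le_or_gt k 0 with h | h
        · rw [Finset.Icc_eq_empty (by omega)]; simp
        · have hk1 : k = 1 := by omega
          subst hk1; simp
      omega
    refine ⟨hk, fun d hd1 hdk hdvd => ?_⟩
    have hmem : ∀ x ∈ ({1, d, k} : Finset Int), x ∈ (Finset.Icc (1:Int) k).filter (fun e => e ∣ k) := by
      intro x hx
      simp only [Finset.mem_insert, Finset.mem_singleton] at hx
      rcases hx with rfl | rfl | rfl <;>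
        simp [Finset.mem_filter, Finset.mem_Icc] <;> omega
    have hsub : ({1, d, k} : Finset Int) ⊆ (Finset.Icc (1:Int) k).filter (fun e => e ∣ k) :=
      fun x hx => hmem x hx
    have hcard3 : ({1, d, k} : Finset Int).card = 3 := by
      rw [Finset.card_insert_of_notMem (by simp; omega),
          Finset.card_insert_of_notMem (by simp; omega), Finset.card_singleton]
    have := Finset.card_le_card hsub
    omega
  · rintro ⟨hk, hnd⟩
    have hset : (Finset.Icc (1:Int) k).filter (fun d => d ∣ k) = {1, k} := by
      ext x
      simp only [Finset.mem_filter, Finset.mem_Icc, Finset.mem_insert, Finset.mem_singleton]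
      constructor
      · rintro ⟨⟨hx1, hxk⟩, hxd⟩
        rcases eq_or_lt_of_le hx1 with h1 | h1
        · left; omega
        · rcases eq_or_lt_of_le hxk with h2 | h2
          · right; exact h2
          · exact absurd hxd (hnd x h1 h2)
      · rintro (rfl | rfl)
        · exact ⟨⟨le_refl _, by omega⟩, one_dvd _⟩
        · exact ⟨⟨by omega, le_refl _⟩, dvd_refl _⟩
    rw [hset, Finset.card_insert_of_notMem (by simp; omega), Finset.card_singleton]
    norm_num

theorem Smith_eq_sum (n c : Int) :
    Smith n c = ∑ k ∈ Finset.Icc c (PySem.Int.floordiv n 2),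
      (if primeCnt k 1 = 2 ∧ PySem.Int.mod n k = 0 then digitSum k else 0) := by
  induction c using Smith.induct (n := n) with
  | case1 c hc hp ih =>
    rw [Smith, if_pos hc, if_pos hp, ih,
        Icc_insert c _ hc, Finset.sum_insert (by simp [Finset.mem_Icc]), if_pos hp]
  | case2 c hc hp ih =>
    rw [Smith, if_pos hc, if_neg hp, ih,
        Icc_insert c _ hc, Finset.sum_insert (by simp [Finset.mem_Icc]), if_neg hp]
    ring
  | case3 c hc =>
    rw [Smith, if_neg hc, Finset.Icc_eq_empty hc, Finset.sum_empty]

theorem Smith_eq_G (n c : Int) :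
    Smith n c = ∑ k ∈ Finset.Icc (2:Int) (PySem.Int.floordiv n 2),
      Gf n c (PySem.Int.floordiv n 2) k := by
  rw [Smith_eq_sum]
  set h := PySem.Int.floordiv n 2 with hh
  have step1 : ∀ k ∈ Finset.Icc c h,
      (if primeCnt k 1 = 2 ∧ PySem.Int.mod n k = 0 then digitSum k else 0) = Gf n c h k := by
    intro k hk
    simp only [Finset.mem_Icc] at hk
    rw [Gf]
    by_cases hcond : primeCnt k 1 = 2 ∧ PySem.Int.mod n k = 0
    · rw [if_pos hcond, if_pos]
      refine ⟨(primeCnt_two_iff k).mp hcond.1, ?_, hk.1, hk.2⟩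
      rw [← PySem.Int.mod_eq_zero_iff_dvd]; exact hcond.2
    · rw [if_neg hcond, if_neg]
      intro ⟨hp, hd, _, _⟩
      exact hcond ⟨(primeCnt_two_iff k).mpr hp, (PySem.Int.mod_eq_zero_iff_dvd n k).mpr hd⟩
  rw [Finset.sum_congr rfl step1]
  -- shift the lower bound from c to 2: the extra terms on either side vanish
  have hsub1 : Finset.Icc c h ⊆ Finset.Icc (min c 2) h := by
    intro x; simp [Finset.mem_Icc]; omega
  have hsub2 : Finset.Icc (2:Int) h ⊆ Finset.Icc (min c 2) h := by
    intro x; simp [Finset.mem_Icc]; omega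
  have e1 : ∑ k ∈ Finset.Icc c h, Gf n c h k = ∑ k ∈ Finset.Icc (min c 2) h, Gf n c h k := by
    refine Finset.sum_subset hsub1 ?_
    intro x hx hnx
    simp only [Finset.mem_Icc] at hx hnx
    rw [Gf, if_neg]; intro ⟨_, _, hcx, _⟩; omega
  have e2 : ∑ k ∈ Finset.Icc (2:Int) h, Gf n c h k = ∑ k ∈ Finset.Icc (min c 2) h, Gf n c h k := by
    refine Finset.sum_subset hsub2 ?_
    intro x hx hnx
    simp only [Finset.mem_Icc] at hx hnx
    rw [Gf, if_neg]; intro ⟨⟨h2, _⟩, _, _, _⟩; omega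
  rw [e1, e2]

theorem isPr_prime {k : Int} (h : isPr k) : Prime k := by
  obtain ⟨hk2, hnd⟩ := h
  have hk : k = ((k.toNat : Nat) : Int) := by omega
  rw [hk]
  apply Nat.prime_iff_prime_int.mp
  rw [Nat.prime_def]
  refine ⟨by omega, fun m hm => ?_⟩
  have hm0 : 0 < m := by
    rcases Nat.eq_zero_or_pos m with rfl | h; · simp at hm; omega
    · exact h
  have hmle : m ≤ k.toNat := Nat.le_of_dvd (by omega) hm
  by_contra hcon
  push Not at hcon
  obtain ⟨h1, h2⟩ := hcon
  have hdInt : (m : Int) ∣ k := by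
    rw [hk]; exact_mod_cast Int.natCast_dvd_natCast.mpr hm
  exact hnd m (by omega) (by omega) hdInt

theorem strip_spec (m p : Int) (hp : isPr p) (hm : 0 < m) :
    0 < strip m p ∧ strip m p ∣ m ∧ ¬ p ∣ strip m p ∧
      (∀ q : Int, isPr q → q ∣ m → q ≠ p → q ∣ strip m p) := by
  induction m using strip.induct (p := p) with
  | case1 m h ih =>
    obtain ⟨hp2, hm0, hmod⟩ := h
    have hdvd : p ∣ m := (PySem.Int.mod_eq_zero_iff_dvd m p).mp hmod
    have heq : m = PySem.Int.floordiv m p * p := by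
      have := PySem.Int.floordiv_mul_add_mod m p
      omega
    have hq0 : 0 < PySem.Int.floordiv m p := by
      by_contra hq
      push Not at hq
      nlinarith
    obtain ⟨ih1, ih2, ih3, ih4⟩ := ih hq0
    rw [strip, if_pos ⟨hp2, hm0, hmod⟩]
    refine ⟨ih1, ih2.trans ⟨p, by linarith [heq]⟩, ih3, ?_⟩
    · intro q hq hqm hqp
      apply ih4 q hq _ hqp
      -- q prime divides m = (m//p) * p and q ≠ p, hence q ∣ m//p
      have hqprime := isPr_prime hq
      have : q ∣ PySem.Int.floordiv m p * p := by rw [← heq]; exact hqm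
      rcases (hqprime.2.2 _ _ this) with h | h
      · exact h
      · exfalso
        have hq2 : 2 ≤ q := hq.1
        have hqlep : q ≤ p := Int.le_of_dvd (by omega) h
        rcases lt_or_eq_of_le hqlep with hlt | heqq
        · exact hp.2 q (by omega) hlt h
        · exact hqp heqq
  | case2 m h =>
    rw [strip, if_neg h]
    have hnd : ¬ p ∣ m := by
      intro hdvd
      exact h ⟨hp.1, hm, (PySem.Int.mod_eq_zero_iff_dvd m p).mpr hdvd⟩
    exact ⟨hm, dvd_refl m, hnd, fun q _ hq _ => hq⟩

theorem isPr_of_exit {m p : Int} (hp : 2 ≤ p) (hm : 1 < m)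
    (A1 : ∀ d : Int, 1 < d → d < p → ¬ d ∣ m) (hstop : m < p * p) : isPr m := by
  refine ⟨by omega, fun d hd1 hdm hdvd => ?_⟩
  obtain ⟨e, he⟩ := hdvd
  have hd0 : 0 < d := by omega
  have he0 : 0 < e := by nlinarith
  have he1 : 1 < e := by
    by_contra hcon
    have : e = 1 := by omega
    subst this
    omega
  have hem : e < m := by nlinarith
  have hedvd : e ∣ m := ⟨d, by linarith [he]⟩
  rcases lt_or_ge d p with hdp | hdp
  · exact A1 d hd1 hdp ⟨e, he⟩
  · rcases lt_or_ge e p with hep | hep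
    · exact A1 e he1 hep hedvd
    · nlinarith

theorem dvd_eq_of_isPr {k m : Int} (hk : 2 ≤ k) (hm : isPr m) (hdvd : k ∣ m) : k = m := by
  have hkm : k ≤ m := Int.le_of_dvd (by have := hm.1; omega) hdvd
  rcases lt_or_eq_of_le hkm with hlt | heq
  · exact absurd hdvd (hm.2 k (by omega) hlt)
  · exact heq

theorem exit_case (n c half total m p : Int)
    (hp : 2 ≤ p) (hm : 0 < m) (hdvd : m ∣ n)
    (A1 : ∀ d : Int, 1 < d → d < p → ¬ d ∣ m)
    (A2 : ∀ q : Int, isPr q → q ∣ n → q < p ∨ q ∣ m)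
    (hstop : m < p * p) :
    (if 1 < m ∧ c ≤ m ∧ m ≤ half then total + dsumAux m 0 else total)
      = total + ∑ k ∈ Finset.Icc p half, Gf n c half k := by
  rcases eq_or_lt_of_le (by omega : (1:Int) ≤ m) with h1 | h1
  · -- m = 1 : nothing left; every remaining Gf term vanishes
    have hm1 : m = 1 := by omega
    subst hm1
    rw [if_neg (by omega)]
    have hz : ∀ k ∈ Finset.Icc p half, Gf n c half k = 0 := by
      intro k hk
      simp only [Finset.mem_Icc] at hk
      rw [Gf, if_neg]
      rintro ⟨hkpr, hkn, _, _⟩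
      rcases A2 k hkpr hkn with h | h
      · omega
      · have := Int.le_of_dvd (by omega) h
        have := hkpr.1
        omega
    rw [Finset.sum_eq_zero hz, add_zero]
  · -- 1 < m : m is the last prime factor
    have hprm : isPr m := isPr_of_exit hp h1 A1 hstop
    have hpm : p ≤ m := by
      by_contra hcon
      push Not at hcon
      exact A1 m (by omega) hcon (dvd_refl m)
    have hothers : ∀ k ∈ Finset.Icc p half, k ≠ m → Gf n c half k = 0 := by
      intro k hk hkm
      simp only [Finset.mem_Icc] at hk
      rw [Gf, if_neg]
      rintro ⟨hkpr, hkn, _, _⟩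
      rcases A2 k hkpr hkn with h | h
      · omega
      · exact hkm (dvd_eq_of_isPr hkpr.1 hprm h)
    rcases le_or_gt m half with hmh | hmh
    · -- m itself contributes (when c ≤ m)
      have hmem : m ∈ Finset.Icc p half := by simp [Finset.mem_Icc]; omega
      rw [Finset.sum_eq_single_of_mem m hmem (fun k hk hkm => hothers k hk hkm)]
      rw [Gf]
      rcases le_or_gt c m with hcm | hcm
      · rw [if_pos ⟨by omega, hcm, hmh⟩, if_pos ⟨hprm, hdvd, hcm, hmh⟩, dsumAux_eq]
        ring
      · rw [if_neg (by omega), if_neg (by rintro ⟨_, _, hc, _⟩; omega), add_zero]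
    · -- m exceeds half : no contribution at all
      rw [if_neg (by omega)]
      have hz : ∀ k ∈ Finset.Icc p half, Gf n c half k = 0 := by
        intro k hk
        apply hothers k hk
        simp only [Finset.mem_Icc] at hk
        omega
      rw [Finset.sum_eq_zero hz, add_zero]

theorem Gf_self (n c half p : Int) (hpr : isPr p) (hdn : p ∣ n) :
    Gf n c half p = (if c ≤ p ∧ p ≤ half then dsumAux p 0 else 0) := by
  rw [Gf]
  by_cases hg : c ≤ p ∧ p ≤ half
  · rw [if_pos ⟨hpr, hdn, hg.1, hg.2⟩, if_pos hg, dsumAux_eq, zero_add]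
  · rw [if_neg (by rintro ⟨_, _, h1, h2⟩; exact hg ⟨h1, h2⟩), if_neg hg]

theorem sum_Icc_succ_bot_G (half p : Int) (f : Int → Int) :
    (if p ≤ half then f p + ∑ k ∈ Finset.Icc (p+1) half, f k
     else 0) = ∑ k ∈ Finset.Icc p half, f k := by
  by_cases hph : p ≤ half
  · rw [if_pos hph, Icc_insert p half hph,
      Finset.sum_insert (by simp [Finset.mem_Icc])]
  · rw [if_neg hph, Finset.Icc_eq_empty hph, Finset.sum_empty]

theorem altLoop_eq (n c half : Int) : ∀ (N : Nat) (m p total : Int),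
    (m + 1 - p).toNat ≤ N → 2 ≤ p → 0 < m → m ∣ n →
    (∀ d : Int, 1 < d → d < p → ¬ d ∣ m) →
    (∀ q : Int, isPr q → q ∣ n → q < p ∨ q ∣ m) →
    altLoop c half m p total = total + ∑ k ∈ Finset.Icc p half, Gf n c half k := by
  intro N
  induction N with
  | zero =>
    intro m p total hN hp hm hdvd A1 A2
    have hstop : m < p * p := by
      have := le_mul_self_int p
      omega
    rw [altLoop, if_neg (by omega)]
    exact exit_case n c half total m p hp hm hdvd A1 A2 hstop
  | succ N ih =>
    intro m p total hN hp hm hdvd A1 A2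
    by_cases hloop : p * p ≤ m
    · have hpm : p ≤ m := le_trans (le_mul_self_int p) hloop
      rw [altLoop, if_pos hloop]
      by_cases hmod : PySem.Int.mod m p = 0
      · -- p divides m: p is prime, strip it, recurse
        have hpdm : p ∣ m := (PySem.Int.mod_eq_zero_iff_dvd m p).mp hmod
        have hppr : isPr p :=
          ⟨hp, fun d hd1 hdp hddvd => A1 d hd1 hdp (hddvd.trans hpdm)⟩
        obtain ⟨s1, s2, s3, s4⟩ := strip_spec m p hppr hm
        rw [if_pos hmod]
        rw [ih (strip m p) (p+1) _ (by have := strip_le m p; omega) (by omega) s1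
          (s2.trans hdvd)
          (fun d hd1 hdp hddvd => by
            rcases lt_or_ge d p with h | h
            · exact A1 d hd1 h (hddvd.trans s2)
            · have hdp' : d = p := by omega
              subst hdp'
              exact s3 hddvd)
          (fun q hq hqn => by
            rcases A2 q hq hqn with h | h
            · left; omega
            · by_cases hqp : q = p
              · left; omega
              · right; exact s4 q hq h hqp)]
        rw [← sum_Icc_succ_bot_G half p (Gf n c half),
            Gf_self n c half p hppr (hpdm.trans hdvd)]
        by_cases hph : p ≤ half
        · rw [if_pos hph]; ring
        · rw [if_neg hph, if_neg (by rintro ⟨_, h⟩; exact hph h),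
              Finset.Icc_eq_empty (by omega : ¬ (p+1:Int) ≤ half), Finset.sum_empty]
          ring
      · -- p does not divide m: p contributes nothing
        rw [if_neg hmod]
        rw [ih m (p+1) total (by omega) (by omega) hm hdvd
          (fun d hd1 hdp hddvd => by
            rcases lt_or_ge d p with h | h
            · exact A1 d hd1 h hddvd
            · have hdp' : d = p := by omega
              exact hmod ((PySem.Int.mod_eq_zero_iff_dvd m p).mpr (by rwa [hdp'] at hddvd)))
          (fun q hq hqn => by
            rcases A2 q hq hqn with h | h
            · left; omega
            · right; exact h)]
        rw [← sum_Icc_succ_bot_G half p (Gf n c half)]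
        have hGp : Gf n c half p = 0 := by
          rw [Gf, if_neg]
          rintro ⟨hpr, hpn, _, _⟩
          rcases A2 p hpr hpn with h | h
          · omega
          · exact hmod ((PySem.Int.mod_eq_zero_iff_dvd m p).mpr h)
        by_cases hph : p ≤ half
        · rw [if_pos hph, hGp]; ring
        · rw [if_neg hph, Finset.Icc_eq_empty (by omega), Finset.sum_empty]
    · rw [altLoop, if_neg hloop]
      exact exit_case n c half total m p hp hm hdvd A1 A2 (by omega)

theorem equal_everywhere : ∀ (n c : Int), Smith n c = Smith_alt n c := by
  intro n c
  rw [Smith_eq_G, Smith_alt]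
  rcases le_or_gt 2 n with hn | hn
  · rw [if_pos hn]
    rw [altLoop_eq n c (PySem.Int.floordiv n 2) (n + 1 - 2).toNat n 2 0
      (by omega) (by omega) (by omega) (dvd_refl n)
      (fun d hd1 hd2 _ => by omega)
      (fun q _ hqn => Or.inr hqn)]
    rw [zero_add]
  · rw [if_neg (by omega)]
    have hh : PySem.Int.floordiv n 2 < 2 := by
      rw [PySem.Int.floordiv_lt_iff_lt_mul (by omega)]
      omega
    rw [Finset.Icc_eq_empty (by omega), Finset.sum_empty]

-- ===== VERDICT (by name: the statement is the Claim_ definition above) =====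
theorem Smith_spec : Claim_equal_Smith := by
  intro n c _ _
  unfold Spec_Smith
  exact equal_everywhere n c
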